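-- pv_equiv track=rewrite | github.com/thomascassidyzm/ssi-dashboard-v7 | generate_baskets_full.py | calculate_distribution
-- ===== SOURCE A (Python) =====
-- def calculate_distribution(phrases):
--     """Calculate phrase length distribution"""
--     dist = {"really_short_1_2": 0, "quite_short_3": 0, "longer_4_5": 0, "long_6_plus": 0}
--     for phrase in phrases:
--         count = phrase[2]
--         if count <= 2:
--             dist["really_short_1_2"] += 1
--         elif count == 3:
--             dist["quite_short_3"] += 1
--         elif count <= 5:
--             dist["longer_4_5"] += 1
--         else:
--             dist["long_6_plus"] += 1
--     return dist
-- ===== SOURCE B (Python) =====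
-- def calculate_distribution(phrases):
--     """Calculate phrase length distribution"""
--     counts = [p[2] for p in phrases]
--     return {
--         "really_short_1_2": sum(1 for c in counts if c <= 2),
--         "quite_short_3": counts.count(3),
--         "longer_4_5": sum(1 for c in counts if 4 <= c <= 5),
--         "long_6_plus": sum(1 for c in counts if c >= 6),
--     }
-- ===== Notes on version B (the rewrite author's own statement) =====
-- stated objective: idiomatic
-- what changed: Replaces the stateful dict with an if/elif cascade incrementing counters by extracting the word counts once and computing each bucket directly with a comprehension/count over disjoint range predicates.
import Mathlib
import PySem

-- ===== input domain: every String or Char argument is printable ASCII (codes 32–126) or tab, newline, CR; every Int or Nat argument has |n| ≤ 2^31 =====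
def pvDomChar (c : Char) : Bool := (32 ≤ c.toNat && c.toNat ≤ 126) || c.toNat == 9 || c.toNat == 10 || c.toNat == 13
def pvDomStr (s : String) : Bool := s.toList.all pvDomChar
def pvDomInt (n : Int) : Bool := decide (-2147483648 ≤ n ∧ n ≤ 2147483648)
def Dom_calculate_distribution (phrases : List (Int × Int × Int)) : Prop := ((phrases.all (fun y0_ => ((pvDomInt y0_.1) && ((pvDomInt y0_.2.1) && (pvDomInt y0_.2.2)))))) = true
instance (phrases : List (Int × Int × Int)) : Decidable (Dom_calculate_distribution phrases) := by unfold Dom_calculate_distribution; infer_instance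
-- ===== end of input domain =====

-- B replaces A's stateful dict + if/elif cascade with one pass extracting the counts
-- and a direct per-bucket tally over disjoint range predicates (idiomatic; same cost).
-- ===== PORT A =====
def calculate_distribution (phrases : List (Int × Int × Int)) : List (String × Int) :=
  let dist : PySem.Dict String Int :=
    PySem.Dict.ofList [("really_short_1_2", 0), ("quite_short_3", 0), ("longer_4_5", 0), ("long_6_plus", 0)]
  let dist := phrases.foldl (fun d phrase =>
    let count := phrase.2.2
    if count ≤ 2 then d.modify "really_short_1_2" 0 (· + 1)
    else if count = 3 then d.modify "quite_short_3" 0 (· + 1)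
    else if count ≤ 5 then d.modify "longer_4_5" 0 (· + 1)
    else d.modify "long_6_plus" 0 (· + 1)) dist
  dist.items

-- ===== PORT B =====
def calculate_distribution_alt (phrases : List (Int × Int × Int)) : List (String × Int) :=
  let counts := phrases.map (fun p => p.2.2)
  [("really_short_1_2", ((counts.countP (fun c => decide (c ≤ 2))) : Int)),
   ("quite_short_3", PySem.List.count counts 3),
   ("longer_4_5", ((counts.countP (fun c => decide (4 ≤ c ∧ c ≤ 5))) : Int)),
   ("long_6_plus", ((counts.countP (fun c => decide (6 ≤ c))) : Int))]

-- ===== PRECONDITION & SPEC =====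
def Spec_calculate_distribution (phrases : List (Int × Int × Int)) (out : List (String × Int)) : Prop := out = calculate_distribution_alt phrases
instance (phrases : List (Int × Int × Int)) (out : List (String × Int)) : Decidable (Spec_calculate_distribution phrases out) := by unfold Spec_calculate_distribution; infer_instance

-- ===== CLAIM (what is proved, stated in full; the proofs are below) =====
def Claim_equal_calculate_distribution : Prop := ∀ (phrases : List (Int × Int × Int)), Dom_calculate_distribution phrases → Spec_calculate_distribution phrases (calculate_distribution phrases)

-- ===== LEMMAS AND PROOFS =====

-- the body of A's loop, keyed by the extracted count (proof helper)
def f : PySem.Dict String Int → Int → PySem.Dict String Int := fun dd count =>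
      if count ≤ 2 then dd.modify "really_short_1_2" 0 (· + 1)
      else if count = 3 then dd.modify "quite_short_3" 0 (· + 1)
      else if count ≤ 5 then dd.modify "longer_4_5" 0 (· + 1)
      else dd.modify "long_6_plus" 0 (· + 1)

lemma loopA (l : List Int) (a b c d : Int) :
    (l.foldl f
      (PySem.Dict.ofList [("really_short_1_2", a), ("quite_short_3", b), ("longer_4_5", c), ("long_6_plus", d)])) =
    PySem.Dict.ofList
      [("really_short_1_2", a + (l.countP (fun x => decide (x ≤ 2)) : Int)),
       ("quite_short_3", b + (l.countP (fun x => decide (¬ x ≤ 2 ∧ x = 3)) : Int)),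
       ("longer_4_5", c + (l.countP (fun x => decide (¬ x ≤ 2 ∧ x ≠ 3 ∧ x ≤ 5)) : Int)),
       ("long_6_plus", d + (l.countP (fun x => decide (¬ x ≤ 2 ∧ x ≠ 3 ∧ ¬ x ≤ 5)) : Int))] := by
  induction l generalizing a b c d with
  | nil => simp
  | cons x xs ih =>
    rw [List.foldl_cons]
    by_cases h1 : x ≤ 2
    · rw [show f (PySem.Dict.ofList [("really_short_1_2", a), ("quite_short_3", b), ("longer_4_5", c), ("long_6_plus", d)]) x
          = PySem.Dict.ofList [("really_short_1_2", a + 1), ("quite_short_3", b), ("longer_4_5", c), ("long_6_plus", d)] from by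
        simp [f, h1, PySem.Dict.modify, PySem.Dict.ofList, PySem.Dict.update, PySem.Dict.insert,
          PySem.Dict.getD, PySem.Dict.get?, PySem.Dict.empty], ih]
      simp [h1]
      ring_nf
    · by_cases h2 : x = 3
      · rw [show f (PySem.Dict.ofList [("really_short_1_2", a), ("quite_short_3", b), ("longer_4_5", c), ("long_6_plus", d)]) x
            = PySem.Dict.ofList [("really_short_1_2", a), ("quite_short_3", b + 1), ("longer_4_5", c), ("long_6_plus", d)] from by
          simp [f, h2, PySem.Dict.modify, PySem.Dict.ofList, PySem.Dict.update, PySem.Dict.insert,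
            PySem.Dict.getD, PySem.Dict.get?, PySem.Dict.empty], ih]
        simp [h2]
        ring_nf
      · by_cases h3 : x ≤ 5
        · rw [show f (PySem.Dict.ofList [("really_short_1_2", a), ("quite_short_3", b), ("longer_4_5", c), ("long_6_plus", d)]) x
              = PySem.Dict.ofList [("really_short_1_2", a), ("quite_short_3", b), ("longer_4_5", c + 1), ("long_6_plus", d)] from by
            simp [f, h1, h2, h3, PySem.Dict.modify, PySem.Dict.ofList, PySem.Dict.update, PySem.Dict.insert,
              PySem.Dict.getD, PySem.Dict.get?, PySem.Dict.empty], ih]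
          have h1' : (2:Int) < x := by omega
          simp [h1', h2, h3]
          try ring_nf
        · rw [show f (PySem.Dict.ofList [("really_short_1_2", a), ("quite_short_3", b), ("longer_4_5", c), ("long_6_plus", d)]) x
              = PySem.Dict.ofList [("really_short_1_2", a), ("quite_short_3", b), ("longer_4_5", c), ("long_6_plus", d + 1)] from by
            simp [f, h1, h2, h3, PySem.Dict.modify, PySem.Dict.ofList, PySem.Dict.update, PySem.Dict.insert,
              PySem.Dict.getD, PySem.Dict.get?, PySem.Dict.empty], ih]
          have h1' : (2:Int) < x := by omega
          have h3' : (5:Int) < x := by omega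
          simp [h1', h2, h3']
          try ring_nf

lemma cnt3 (l : List Int) :
    (l.countP (fun x => decide (¬ x ≤ 2 ∧ x = 3)) : Int) = PySem.List.count l 3 := by
  rw [PySem.List.count_eq, List.count_eq_countP]
  congr 1
  apply List.countP_congr
  intro x _
  simp only [decide_eq_true_eq, beq_iff_eq]
  constructor
  · rintro ⟨_, h⟩; omega
  · intro h; constructor <;> omega

lemma cnt45 (l : List Int) :
    l.countP (fun x => decide (¬ x ≤ 2 ∧ x ≠ 3 ∧ x ≤ 5)) = l.countP (fun c => decide (4 ≤ c ∧ c ≤ 5)) := by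
  apply List.countP_congr
  intro x _
  simp only [decide_eq_true_eq]
  omega

lemma cnt6 (l : List Int) :
    l.countP (fun x => decide (¬ x ≤ 2 ∧ x ≠ 3 ∧ ¬ x ≤ 5)) = l.countP (fun c => decide (6 ≤ c)) := by
  apply List.countP_congr
  intro x _
  simp only [decide_eq_true_eq]
  omega

-- ===== VERDICT (by name: the statement is the Claim_ definition above) =====
theorem calculate_distribution_spec : Claim_equal_calculate_distribution := by
  intro phrases _
  show (phrases.foldl (fun d p => f d p.2.2)
      (PySem.Dict.ofList [("really_short_1_2", 0), ("quite_short_3", 0), ("longer_4_5", 0), ("long_6_plus", 0)])).items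
    = [("really_short_1_2", (((phrases.map (fun p => p.2.2)).countP (fun c => decide (c ≤ 2))) : Int)),
       ("quite_short_3", PySem.List.count (phrases.map (fun p => p.2.2)) 3),
       ("longer_4_5", (((phrases.map (fun p => p.2.2)).countP (fun c => decide (4 ≤ c ∧ c ≤ 5))) : Int)),
       ("long_6_plus", (((phrases.map (fun p => p.2.2)).countP (fun c => decide (6 ≤ c))) : Int))]
  rw [show phrases.foldl (fun d p => f d p.2.2)
        (PySem.Dict.ofList [("really_short_1_2", 0), ("quite_short_3", 0), ("longer_4_5", 0), ("long_6_plus", 0)])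
      = (phrases.map (fun p => p.2.2)).foldl f
        (PySem.Dict.ofList [("really_short_1_2", 0), ("quite_short_3", 0), ("longer_4_5", 0), ("long_6_plus", 0)])
      from List.foldl_map.symm, loopA]
  simp only [zero_add, cnt3, cnt45, cnt6]
  simp [PySem.Dict.ofList, PySem.Dict.update, PySem.Dict.insert, 
    PySem.Dict.empty]
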